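-- pv_equiv track=rewrite | github.com/Steve973/pybastion | pybastion-integration/pybastion_integration/stages/build_full_call_graph_from_inventory.py | parse_ei_num
-- ===== SOURCE A (Python) =====
-- def parse_ei_num(ei_id: str) -> int:
--     if "_E" not in ei_id:
--         return 10 ** 9
--     suffix = ei_id.rsplit("_E", 1)[1]
--     digits = []
--     for ch in suffix:
--         if ch.isdigit():
--             digits.append(ch)
--         else:
--             break
--     return int("".join(digits)) if digits else 10 ** 9
-- ===== SOURCE B (Python) =====
-- def parse_ei_num(ei_id: str) -> int:
--     # Online single pass: a tiny state machine over the characters, no searching/splitting.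
--     buf = ""       # digits collected right after the most recent "_E"
--     grow = False   # that digit run is still open
--     prev = ""
--     for ch in ei_id:
--         if prev == "_" and ch == "E":
--             buf, grow = "", True
--         elif grow and ch.isdigit():
--             buf += ch
--         else:
--             grow = False
--         prev = ch
--     return int(buf) if buf else 10 ** 9
-- ===== Notes on version B (the rewrite author's own statement) =====
-- stated objective: alternative
-- what changed: Replaces A's find-then-parse staging (substring membership test, rsplit at the last '_E', digit-list accumulation, join, int) by an online single left-to-right pass: a three-field state machine (previous char, run-open flag, digit buffer) that resets its buffer at each '_E' it passes, so no search or split ever happens.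
import Mathlib
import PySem

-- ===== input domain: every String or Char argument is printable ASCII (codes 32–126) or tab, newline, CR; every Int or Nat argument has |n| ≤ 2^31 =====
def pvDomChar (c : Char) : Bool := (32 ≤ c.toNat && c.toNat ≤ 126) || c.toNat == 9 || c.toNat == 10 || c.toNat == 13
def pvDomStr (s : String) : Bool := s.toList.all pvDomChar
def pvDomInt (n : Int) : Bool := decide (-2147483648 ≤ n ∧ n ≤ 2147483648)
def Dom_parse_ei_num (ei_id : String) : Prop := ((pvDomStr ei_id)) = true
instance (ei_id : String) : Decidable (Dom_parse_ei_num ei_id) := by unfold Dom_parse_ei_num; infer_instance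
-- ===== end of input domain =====

-- B replaces A's find-then-parse staging (membership test + rsplit at the last "_E" +
-- digit accumulation + int) by one online left-to-right state machine (objective:
-- alternative single-pass decomposition, same cost).

-- ===== PORT A =====
-- A's digit-collecting loop: append while ch.isdigit(), break at the first non-digit
def pvCollect : List Char → List Char
  | [] => []
  | c :: cs => if PySem.Chars.isdigit c then c :: pvCollect cs else []

def parse_ei_num (ei_id : String) : Int :=
  if !(PySem.Str.isIn "_E" ei_id) then 10 ^ 9
  else
    -- ei_id.rsplit("_E", 1)[1], ported by hand: the text after the LAST "_E";
    -- exact because the guard guarantees "_E" occurs (rfind ≥ 0)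
    let suffix := ei_id.toList.drop ((PySem.Chars.rfind ei_id.toList ['_', 'E']).toNat + 2)
    let digits := pvCollect suffix
    -- int("".join(digits)): digits is a nonempty run of decimal digits here, so int() returns
    if digits = [] then 10 ^ 9 else (PySem.Int.ofChars? digits).getD 0

-- ===== PORT B =====
-- B's loop body: state = (prev char, grow flag, digit buffer after the latest "_E")
def pvStepB (st : Option Char × Bool × List Char) (ch : Char) : Option Char × Bool × List Char :=
  let (prev, grow, buf) := st
  if prev == some '_' && ch == 'E' then (some ch, true, [])
  else if grow && PySem.Chars.isdigit ch then (some ch, true, buf ++ [ch])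
  else (some ch, false, buf)

def parse_ei_num_alt (ei_id : String) : Int :=
  let st := ei_id.toList.foldl pvStepB (none, false, ([] : List Char))
  -- int(buf) if buf else 10**9: buf is a nonempty run of decimal digits here, so int() returns
  if st.2.2 ≠ [] then (PySem.Int.ofChars? st.2.2).getD 0 else 10 ^ 9

-- ===== PRECONDITION & SPEC =====
def Spec_parse_ei_num (ei_id : String) (out : Int) : Prop := out = parse_ei_num_alt ei_id
instance (ei_id : String) (out : Int) : Decidable (Spec_parse_ei_num ei_id out) := by unfold Spec_parse_ei_num; infer_instance

-- ===== CLAIM (what is proved, stated in full; the proofs are below) =====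
def Claim_equal_parse_ei_num : Prop := ∀ (ei_id : String), Dom_parse_ei_num ei_id → Spec_parse_ei_num ei_id (parse_ei_num ei_id)

-- ===== LEMMAS AND PROOFS =====

-- proof-only abbreviations: the text after the LAST "_E", A's two derived quantities
def pvSuffix (s : List Char) : List Char :=
  s.drop ((PySem.Chars.rfind s ['_', 'E']).toNat + 2)
def pvGrow (s : List Char) : Bool :=
  PySem.Chars.isIn ['_', 'E'] s && (pvSuffix s).all PySem.Chars.isdigit
def pvBufL (s : List Char) : List Char :=
  if PySem.Chars.isIn ['_', 'E'] s then (pvSuffix s).takeWhile PySem.Chars.isdigit else []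

theorem pvCollect_eq_takeWhile (cs : List Char) :
    pvCollect cs = cs.takeWhile PySem.Chars.isdigit := by
  induction cs with
  | nil => rfl
  | cons c cs ih => by_cases h : PySem.Chars.isdigit c <;> simp [pvCollect, h, ih]

-- a two-character occurrence, characterized by indexing
theorem pvPrefix2_iff (s : List Char) (i : Nat) :
    (['_', 'E'] <+: s.drop i) ↔ (s[i]? = some '_' ∧ s[i + 1]? = some 'E') := by
  constructor
  · rintro ⟨t, ht⟩
    have h0 : (s.drop i)[0]? = some '_' := by rw [← ht]; rfl
    have h1 : (s.drop i)[1]? = some 'E' := by rw [← ht]; rfl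
    rw [List.getElem?_drop] at h0 h1
    simpa using ⟨h0, h1⟩
  · rintro ⟨h0, h1⟩
    have hi1 : i + 1 < s.length := (List.getElem?_eq_some_iff.mp h1).1
    have hi : i < s.length := by omega
    refine ⟨s.drop (i + 2), ?_⟩
    rw [List.drop_eq_getElem_cons hi, List.drop_eq_getElem_cons hi1]
    have e0 : s[i] = '_' := by simpa [List.getElem?_eq_getElem hi] using h0
    have e1 : s[i + 1] = 'E' := by simpa [List.getElem?_eq_getElem hi1] using h1
    simp [e0, e1]

-- rfind's scan returns -1 exactly when sub is a prefix of no suffix s.drop i with i ≤ j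
theorem pvGo_eq_neg_one_iff (s sub : List Char) (j : Nat) :
    PySem.Chars.rfind.go s sub j = -1 ↔ ∀ i ≤ j, ¬ sub <+: s.drop i := by
  induction j with
  | zero =>
      rw [PySem.Chars.rfind.go]
      split_ifs with h
      · simp only [false_iff]
        push Not
        exact ⟨0, le_rfl, by simpa using List.isPrefixOf_iff_prefix.mp h⟩
      · simp only [true_iff]
        intro i hi
        rw [Nat.le_zero.mp hi]
        simpa using fun hp => h (List.isPrefixOf_iff_prefix.mpr hp)
  | succ j ih =>
      rw [PySem.Chars.rfind.go]
      split_ifs with h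
      · constructor
        · intro hc
          exact absurd hc (by exact_mod_cast (by omega : ¬ ((j : Int) + 1 = -1)))
        · intro hall; exact absurd (List.isPrefixOf_iff_prefix.mp h) (hall (j + 1) le_rfl)
      · rw [ih]
        constructor
        · intro hall i hi
          rcases Nat.lt_or_ge i (j + 1) with hlt | hge
          · exact hall i (Nat.lt_succ_iff.mp hlt)
          · have : i = j + 1 := le_antisymm hi hge
            subst this
            exact fun hp => h (List.isPrefixOf_iff_prefix.mpr hp)
        · intro hall i hi; exact hall i (Nat.le_succ_of_le hi)

theorem pvRfind_eq_neg_one_iff (s : List Char) :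
    PySem.Chars.rfind s ['_', 'E'] = -1 ↔ PySem.Chars.isIn ['_', 'E'] s = false := by
  rw [PySem.Chars.isIn_eq_false_iff, PySem.Chars.rfind, pvGo_eq_neg_one_iff]
  constructor
  · intro hall hinf
    rcases (PySem.Chars.exists_prefix_drop_iff_isIn ['_', 'E'] s).2
        ((PySem.Chars.isIn_iff_infix ['_', 'E'] s).mpr hinf) with ⟨i, hp⟩
    rcases Nat.le_total i s.length with hle | hge
    · exact hall i hle hp
    · rw [List.drop_eq_nil_of_le hge] at hp
      simpa using hp.length_le
  · intro hninf i _ hp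
    exact hninf ((PySem.Chars.isIn_iff_infix ['_', 'E'] s).mp
      ((PySem.Chars.exists_prefix_drop_iff_isIn ['_', 'E'] s).1 ⟨i, hp⟩))

-- uniqueness: the scan returns k if k carries an occurrence and nothing above k up to j does
theorem pvGo_eq_of (s sub : List Char) (j k : Nat) (hk : sub <+: s.drop k) (hkj : k ≤ j)
    (hmax : ∀ i, k < i → i ≤ j → ¬ sub <+: s.drop i) :
    PySem.Chars.rfind.go s sub j = (k : Int) := by
  induction j with
  | zero =>
      have : k = 0 := Nat.le_zero.mp hkj
      subst this
      rw [PySem.Chars.rfind.go, if_pos (List.isPrefixOf_iff_prefix.mpr (by simpa using hk))]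
      simp
  | succ j ih =>
      rw [PySem.Chars.rfind.go]
      rcases Nat.lt_or_ge k (j + 1) with hlt | hge
      · rw [if_neg (fun h => hmax (j + 1) hlt le_rfl (List.isPrefixOf_iff_prefix.mp h))]
        exact ih (Nat.lt_succ_iff.mp hlt) (fun i h1 h2 => hmax i h1 (Nat.le_succ_of_le h2))
      · have : k = j + 1 := le_antisymm hkj hge
        subst this
        rw [if_pos (List.isPrefixOf_iff_prefix.mpr hk)]

-- existence: a non-(-1) scan result is such a k
theorem pvGo_spec (s sub : List Char) (j : Nat) (h : PySem.Chars.rfind.go s sub j ≠ -1) :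
    ∃ k : Nat, PySem.Chars.rfind.go s sub j = (k : Int) ∧ k ≤ j ∧ sub <+: s.drop k ∧
      ∀ i, k < i → i ≤ j → ¬ sub <+: s.drop i := by
  induction j with
  | zero =>
      rw [PySem.Chars.rfind.go] at h ⊢
      split_ifs at h ⊢ with hp
      · exact ⟨0, rfl, le_rfl, by simpa using List.isPrefixOf_iff_prefix.mp hp,
          fun i h1 h2 => absurd (Nat.lt_of_lt_of_le h1 h2) (lt_irrefl 0)⟩
      · exact absurd rfl h
  | succ j ih =>
      rw [PySem.Chars.rfind.go] at h ⊢
      split_ifs at h ⊢ with hp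
      · exact ⟨j + 1, rfl, le_rfl, List.isPrefixOf_iff_prefix.mp hp,
          fun i h1 h2 => absurd (Nat.lt_of_lt_of_le h1 h2) (lt_irrefl _)⟩
      · rcases ih h with ⟨k, hgo, hkj, hocc, hmax⟩
        refine ⟨k, hgo, Nat.le_succ_of_le hkj, hocc, fun i h1 h2 => ?_⟩
        rcases Nat.lt_or_ge i (j + 1) with hlt | hge
        · exact hmax i h1 (Nat.lt_succ_iff.mp hlt)
        · have : i = j + 1 := le_antisymm h2 hge
          subst this
          exact fun hpp => hp (List.isPrefixOf_iff_prefix.mpr hpp)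

-- packaged spec of rfind when "_E" occurs
theorem pvRfind_spec (s : List Char) (hin : PySem.Chars.isIn ['_', 'E'] s = true) :
    ∃ k : Nat, PySem.Chars.rfind s ['_', 'E'] = (k : Int) ∧ k + 2 ≤ s.length ∧
      ['_', 'E'] <+: s.drop k ∧ ∀ i, k < i → ¬ ['_', 'E'] <+: s.drop i := by
  have hne : PySem.Chars.rfind.go s ['_', 'E'] s.length ≠ -1 := by
    rw [← PySem.Chars.rfind, ne_eq, pvRfind_eq_neg_one_iff, hin]
    simp
  rcases pvGo_spec s ['_', 'E'] s.length hne with ⟨k, hgo, hkj, hocc, hmax⟩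
  refine ⟨k, hgo, ?_, hocc, fun i h1 hp => ?_⟩
  · have := hocc.length_le
    simp at this
    omega
  · have hp2 := ((pvPrefix2_iff s i).mp hp).2
    have hi1 : i + 1 < s.length := (List.getElem?_eq_some_iff.mp hp2).1
    exact hmax i h1 (by omega) hp

-- appending a char that does not complete a new "_E" changes no occurrence
theorem pvOcc_append (s : List Char) (c : Char)
    (hM : ¬(s.getLast? = some '_' ∧ c = 'E')) (i : Nat) :
    (['_', 'E'] <+: (s ++ [c]).drop i) ↔ (['_', 'E'] <+: s.drop i) := by
  rw [pvPrefix2_iff, pvPrefix2_iff]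
  rcases Nat.lt_trichotomy (i + 1) s.length with h | h | h
  · rw [List.getElem?_append_left (by omega), List.getElem?_append_left h]
  · have hi : i < s.length := by omega
    rw [List.getElem?_append_left hi, List.getElem?_append_right (by omega)]
    have h2 : s[i + 1]? = none := by simp; omega
    rw [h2]
    simp only [h, Nat.sub_self, List.getElem?_singleton]
    constructor
    · rintro ⟨h0, h1⟩
      simp at h1
      exact absurd ⟨by rw [List.getLast?_eq_getElem?]
                       simpa [show s.length - 1 = i by omega] using h0, h1⟩ hM
    · rintro ⟨-, h1⟩
      exact absurd h1 (by simp)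
  · have h1 : (s ++ [c])[i + 1]? = none := by simp; omega
    have h2 : s[i + 1]? = none := by simp; omega
    rw [h1, h2]
    simp
theorem pvIsIn_append (s : List Char) (c : Char)
    (hM : ¬(s.getLast? = some '_' ∧ c = 'E')) :
    PySem.Chars.isIn ['_', 'E'] (s ++ [c]) = PySem.Chars.isIn ['_', 'E'] s := by
  rcases h : PySem.Chars.isIn ['_', 'E'] s with _ | _
  · rcases h' : PySem.Chars.isIn ['_', 'E'] (s ++ [c]) with _ | _
    · rfl
    · exfalso
      rcases (PySem.Chars.exists_prefix_drop_iff_isIn ['_', 'E'] (s ++ [c])).2 h' with ⟨i, hp⟩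
      have hS := (PySem.Chars.exists_prefix_drop_iff_isIn ['_', 'E'] s).1
        ⟨i, (pvOcc_append s c hM i).mp hp⟩
      rw [h] at hS
      exact Bool.false_ne_true hS
  · rcases (PySem.Chars.exists_prefix_drop_iff_isIn ['_', 'E'] s).2 h with ⟨i, hp⟩
    exact (PySem.Chars.exists_prefix_drop_iff_isIn ['_', 'E'] (s ++ [c])).1
      ⟨i, (pvOcc_append s c hM i).mpr hp⟩

theorem pvRfind_append (s : List Char) (c : Char)
    (hM : ¬(s.getLast? = some '_' ∧ c = 'E'))
    (hin : PySem.Chars.isIn ['_', 'E'] s = true) :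
    PySem.Chars.rfind (s ++ [c]) ['_', 'E'] = PySem.Chars.rfind s ['_', 'E'] := by
  rcases pvRfind_spec s hin with ⟨k, hgo, hk2, hocc, hmax⟩
  rw [hgo, PySem.Chars.rfind]
  exact pvGo_eq_of (s ++ [c]) ['_', 'E'] (s ++ [c]).length k
    ((pvOcc_append s c hM k).mpr hocc) (by simp; omega)
    (fun i h1 _ hp => hmax i h1 ((pvOcc_append s c hM i).mp hp))

-- completing a "_E" at the end: rfind lands on it, the suffix after it is empty
theorem pvRfind_marker (s : List Char) (h_ : s.getLast? = some '_') :
    PySem.Chars.rfind (s ++ ['E']) ['_', 'E'] = ((s.length - 1 : Nat) : Int) ∧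
      PySem.Chars.isIn ['_', 'E'] (s ++ ['E']) = true := by
  have hs : s ≠ [] := by rintro rfl; simp at h_
  have hlen : 1 ≤ s.length := List.length_pos_iff.mpr hs
  have hocc : ['_', 'E'] <+: (s ++ ['E']).drop (s.length - 1) := by
    rw [pvPrefix2_iff]
    constructor
    · rw [List.getElem?_append_left (by omega)]
      rw [List.getLast?_eq_getElem?] at h_
      exact h_
    · rw [show s.length - 1 + 1 = s.length by omega, List.getElem?_append_right le_rfl]
      simp
  refine ⟨?_, (PySem.Chars.exists_prefix_drop_iff_isIn ['_', 'E'] (s ++ ['E'])).1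
    ⟨s.length - 1, hocc⟩⟩
  rw [PySem.Chars.rfind]
  refine pvGo_eq_of _ _ _ _ hocc (by simp; omega) (fun i h1 _ hp => ?_)
  have h2 := ((pvPrefix2_iff _ i).mp hp).2
  rw [List.getElem?_eq_some_iff] at h2
  have := h2.1
  simp at this
  omega

-- the three-field invariant of B's single pass, phrased with A's derived quantities
theorem pvInv (s : List Char) :
    s.foldl pvStepB (none, false, ([] : List Char)) = (s.getLast?, pvGrow s, pvBufL s) := by
  induction s using List.reverseRecOn with
  | nil => simp [pvGrow, pvBufL, pvSuffix]; decide
  | append_singleton s c ih =>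
      rw [List.foldl_append, List.foldl_cons, List.foldl_nil, ih]
      by_cases hM : s.getLast? = some '_' ∧ c = 'E'
      · obtain ⟨hL, rfl⟩ := hM
        obtain ⟨hrf, hin⟩ := pvRfind_marker s hL
        have hs : s ≠ [] := by rintro rfl; simp at hL
        have hlen : 1 ≤ s.length := List.length_pos_iff.mpr hs
        have hsuf : pvSuffix (s ++ ['E']) = [] := by
          rw [pvSuffix, hrf]
          simp
          omega
        simp [pvStepB, hL, pvGrow, pvBufL, hin, hsuf]
      · have hstep : pvStepB (s.getLast?, pvGrow s, pvBufL s) c =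
            (some c, pvGrow s && PySem.Chars.isdigit c,
              if pvGrow s && PySem.Chars.isdigit c then pvBufL s ++ [c] else pvBufL s) := by
          rw [pvStepB]
          have hne : (s.getLast? == some '_' && c == 'E') = false := by
            rcases h1 : s.getLast? == some '_' with _ | _
            · rfl
            · rcases h2 : c == 'E' with _ | _
              · rfl
              · exact absurd ⟨by simpa using h1, by simpa using h2⟩ hM
          rw [hne]
          rcases hg : pvGrow s && PySem.Chars.isdigit c with _ | _ <;> simp
        rw [hstep]
        have hlast : (s ++ [c]).getLast? = some c := by simp
        rcases hin : PySem.Chars.isIn ['_', 'E'] s with _ | _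
        · have hin' := (pvIsIn_append s c hM).trans hin
          have hg : pvGrow s = false := by simp [pvGrow, hin]
          simp [hlast, pvGrow, pvBufL, hin, hin']
        · have hin' := (pvIsIn_append s c hM).trans hin
          rcases pvRfind_spec s hin with ⟨k, hgo, hk2, -, -⟩
          have hsuf : pvSuffix (s ++ [c]) = pvSuffix s ++ [c] := by
            rw [pvSuffix, pvSuffix, pvRfind_append s c hM hin, hgo]
            simp
            rw [List.drop_append_of_le_length (by omega)]
          have hgrow : pvGrow (s ++ [c]) =
              (pvGrow s && PySem.Chars.isdigit c) := by
            rw [pvGrow, pvGrow, hin, hin', hsuf, List.all_append]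
            simp
          refine Prod.ext hlast.symm (Prod.ext hgrow.symm ?_)
          show (if pvGrow s && PySem.Chars.isdigit c then pvBufL s ++ [c] else pvBufL s) =
            pvBufL (s ++ [c])
          have hbufS : pvBufL s = (pvSuffix s).takeWhile PySem.Chars.isdigit := by
            simp [pvBufL, hin]
          have hbufSC : pvBufL (s ++ [c]) =
              (pvSuffix s ++ [c]).takeWhile PySem.Chars.isdigit := by
            simp [pvBufL, hin', hsuf]
          rw [hbufS, hbufSC, List.takeWhile_append]
          rcases hAD : (pvSuffix s).all PySem.Chars.isdigit with _ | _
          · have hg : pvGrow s = false := by simp [pvGrow, hAD]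
            have hne : ((pvSuffix s).takeWhile PySem.Chars.isdigit).length ≠
                (pvSuffix s).length := by
              intro hlen
              have heq : (pvSuffix s).takeWhile PySem.Chars.isdigit = pvSuffix s :=
                List.Sublist.eq_of_length (List.takeWhile_sublist _) hlen
              have hall : (pvSuffix s).all PySem.Chars.isdigit = true :=
                List.all_eq_true.mpr (fun x hx =>
                  List.mem_takeWhile_imp (heq.symm ▸ hx))
              rw [hall] at hAD
              simp at hAD
            rw [if_neg hne]
            simp [hg]
          · have htw : (pvSuffix s).takeWhile PySem.Chars.isdigit = pvSuffix s :=
              List.takeWhile_eq_self_iff.mpr (List.all_eq_true.mp hAD)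
            have hg : pvGrow s = true := by simp [pvGrow, hin, hAD]
            have hlen : ((pvSuffix s).takeWhile PySem.Chars.isdigit).length =
                (pvSuffix s).length := by rw [htw]
            rw [if_pos hlen]
            rcases hd : PySem.Chars.isdigit c with _ | _ <;>
              simp [hg, hd, htw]

-- ===== VERDICT (by name: the statement is the Claim_ definition above) =====
theorem parse_ei_num_spec : Claim_equal_parse_ei_num := by
  intro ei_id _
  unfold Spec_parse_ei_num parse_ei_num parse_ei_num_alt
  simp only [PySem.Str.isIn_eq]
  have htl : ("_E" : String).toList = ['_', 'E'] := rfl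
  rw [htl, pvInv]
  rcases hin : PySem.Chars.isIn ['_', 'E'] ei_id.toList with _ | _
  · have hb : pvBufL ei_id.toList = [] := by rw [pvBufL, hin]; simp
    simp [hb]
  · have hb : pvBufL ei_id.toList =
        pvCollect (ei_id.toList.drop ((PySem.Chars.rfind ei_id.toList ['_', 'E']).toNat + 2)) := by
      rw [pvBufL, hin, if_pos rfl, pvCollect_eq_takeWhile, pvSuffix]
    simp only [Bool.not_true, Bool.false_eq_true, if_false, hb]
    by_cases hd : pvCollect (ei_id.toList.drop
        ((PySem.Chars.rfind ei_id.toList ['_', 'E']).toNat + 2)) = [] <;>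
      simp [hd]
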